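-- pv_equiv track=rewrite | github.com/JakubBraz/adventOfCode2023 | day21.py | count_rem
-- ===== SOURCE A (Python) =====
-- def count_rem(board, part):
--     result = 0
--     n = len(board)
--     ranges = {
--         0: (range(0, n // 2), lambda i: range(0, n // 2 - i), lambda i: i % 2 != 0),
--         1: (range(0, n // 2), lambda i: range(n // 2 + i, n), lambda i: True),
--         2: (range(n // 2, n), lambda i: range(0, i - n // 2), lambda i: i % 2 != 0),
--         3: (range(n // 2, n), lambda i: range(n - (i - n // 2), n), lambda i: False)
--     }
--     range_x, range_y, do_skip = ranges[part]
--     for x in range_x: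
--         skip = do_skip(x)
--         for y in range_y(x):
--             if not skip and board[x][y] in ['.', 'S']:
--                 result += 1
--             skip = not skip
--     return result
-- ===== SOURCE B (Python) =====
-- def region_test(part, n):
--     h = n // 2
--     if part == 0:
--         return lambda x, y: x < h and y < h - x and y % 2 == x % 2
--     elif part == 1:
--         return lambda x, y: x < h and h + x <= y < n and (y - (h + x)) % 2 == 1
--     elif part == 2:
--         return lambda x, y: h <= x and y < x - h and y % 2 == x % 2
--     elif part == 3:
--         return lambda x, y: h <= x and n - (x - h) <= y < n and (y - (n - (x - h))) % 2 == 0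
--     raise KeyError(part)
--
-- def count_rem(board, part):
--     n = len(board)
--     ok = region_test(part, n)
--     total = 0
--     for x, row in enumerate(board):
--         for y, c in enumerate(row):
--             if ok(x, y) and c in ('.', 'S'):
--                 total += 1
--     return total
-- ===== Notes on version B (the rewrite author's own statement) =====
-- stated objective: simpler
-- what changed: Replaces A's ranges-dict of lambdas, per-part triangular loops and stateful skip toggle by one plain double enumerate over the whole board that tests region membership and column parity with explicit inequalities.
import Mathlib
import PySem

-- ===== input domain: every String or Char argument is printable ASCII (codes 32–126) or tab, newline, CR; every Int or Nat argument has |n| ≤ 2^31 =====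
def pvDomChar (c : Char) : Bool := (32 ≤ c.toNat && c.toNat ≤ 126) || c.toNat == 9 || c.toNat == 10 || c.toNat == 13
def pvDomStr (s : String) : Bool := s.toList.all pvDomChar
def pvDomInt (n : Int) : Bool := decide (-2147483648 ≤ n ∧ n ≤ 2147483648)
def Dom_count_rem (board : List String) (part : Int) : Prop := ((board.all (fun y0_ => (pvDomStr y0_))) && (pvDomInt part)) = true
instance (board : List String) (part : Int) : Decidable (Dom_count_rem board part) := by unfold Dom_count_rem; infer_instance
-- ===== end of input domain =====

-- B replaces A's ranges-dict of lambdas and stateful skip toggle by one plain double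
-- enumerate over the whole board with explicit region/parity inequalities (objective: simpler).

-- ===== PORT A =====
-- board[x][y] in ['.', 'S']; none = IndexError (Python raises there; excluded by Pre_)
def pvCellA (board : List String) (x y : Int) : Bool :=
  match PySem.List.pyGet? board x with
  | none => false
  | some row =>
    match PySem.Str.pyGet? row y with
    | none => false
    | some c => c == '.' || c == 'S'

def count_rem (board : List String) (part : Int) : Int :=
  let n : Int := board.length
  let ranges : PySem.Dict Int (List Int × (Int → List Int) × (Int → Bool)) :=
    ((((PySem.Dict.empty).insert 0
        (PySem.List.pyRange 0 (PySem.Int.floordiv n 2) 1,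
         fun i => PySem.List.pyRange 0 (PySem.Int.floordiv n 2 - i) 1,
         fun i => PySem.Int.mod i 2 != 0)).insert 1
        (PySem.List.pyRange 0 (PySem.Int.floordiv n 2) 1,
         fun i => PySem.List.pyRange (PySem.Int.floordiv n 2 + i) n 1,
         fun _ => true)).insert 2
        (PySem.List.pyRange (PySem.Int.floordiv n 2) n 1,
         fun i => PySem.List.pyRange 0 (i - PySem.Int.floordiv n 2) 1,
         fun i => PySem.Int.mod i 2 != 0)).insert 3
        (PySem.List.pyRange (PySem.Int.floordiv n 2) n 1,
         fun i => PySem.List.pyRange (n - (i - PySem.Int.floordiv n 2)) n 1,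
         fun _ => false)
  match ranges.get? part with
  | none => 0  -- KeyError: excluded by Pre_
  | some (range_x, range_y, do_skip) =>
    range_x.foldl (fun result x =>
      ((range_y x).foldl
        (fun (st : Int × Bool) y =>
          (if !st.2 && pvCellA board x y then st.1 + 1 else st.1, !st.2))
        (result, do_skip x)).1) 0

-- ===== PORT B =====
def pvRegionTest (part n : Int) : Int → Int → Bool :=
  let h := PySem.Int.floordiv n 2
  if part == 0 then fun x y => decide (x < h) && decide (y < h - x) && (PySem.Int.mod y 2 == PySem.Int.mod x 2)
  else if part == 1 then fun x y => decide (x < h) && (decide (h + x ≤ y) && decide (y < n)) && (PySem.Int.mod (y - (h + x)) 2 == 1)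
  else if part == 2 then fun x y => decide (h ≤ x) && decide (y < x - h) && (PySem.Int.mod y 2 == PySem.Int.mod x 2)
  else if part == 3 then fun x y => decide (h ≤ x) && (decide (n - (x - h) ≤ y) && decide (y < n)) && (PySem.Int.mod (y - (n - (x - h))) 2 == 0)
  else fun _ _ => false  -- Python raises KeyError(part) here; excluded by Pre_

def count_rem_alt (board : List String) (part : Int) : Int :=
  let n : Int := board.length
  let ok := pvRegionTest part n
  (PySem.List.enumerate board 0).foldl (fun total p =>
    (PySem.List.enumerate p.2.toList 0).foldl (fun t q =>
      if ok p.1 q.1 && (q.2 == '.' || q.2 == 'S') then t + 1 else t) total) 0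

-- ===== PRECONDITION & SPEC =====
-- pvAcc part n x y ↔ A's loops actually read board[x][y] (region membership plus the skip parity)
def pvAcc (part : Int) (n x y : Nat) : Bool :=
  decide ((part = 0 ∧ x < n / 2 ∧ y < n / 2 - x ∧ y % 2 = x % 2) ∨
  (part = 1 ∧ x < n / 2 ∧ n / 2 + x ≤ y ∧ y < n ∧ (y - (n / 2 + x)) % 2 = 1) ∨
  (part = 2 ∧ n / 2 ≤ x ∧ y < x - n / 2 ∧ y % 2 = x % 2) ∨
  (part = 3 ∧ n / 2 ≤ x ∧ n - (x - n / 2) ≤ y ∧ y < n ∧ (y - (n - (x - n / 2))) % 2 = 0))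

-- Exactly the inputs where Python A returns: the part key exists and every cell the
-- toggle loop reads lies inside its row (otherwise KeyError / IndexError).
def Pre_count_rem (board : List String) (part : Int) : Prop :=
  (part = 0 ∨ part = 1 ∨ part = 2 ∨ part = 3) ∧
  ∀ x < board.length, ∀ y < board.length,
    pvAcc part board.length x y = true → y < (board.getD x "").toList.length

instance (board : List String) (part : Int) : Decidable (Pre_count_rem board part) := by
  unfold Pre_count_rem; infer_instance

def pvWitness_count_rem : List String × Int := (["S.", ".."], 0)

def Spec_count_rem (board : List String) (part : Int) (out : Int) : Prop := out = count_rem_alt board part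
instance (board : List String) (part : Int) (out : Int) : Decidable (Spec_count_rem board part out) := by unfold Spec_count_rem; infer_instance

-- ===== CLAIM (what is proved, stated in full; the proofs are below) =====
def Claim_equal_count_rem : Prop := ∀ (board : List String) (part : Int), Dom_count_rem board part → Pre_count_rem board part → Spec_count_rem board part (count_rem board part)

-- ===== LEMMAS AND PROOFS =====

-- proof-side form of B's region test with the part dispatch pushed inside
def pvInRegion (part n x y : Int) : Bool :=
  let h := PySem.Int.floordiv n 2
  if part == 0 then decide (x < h) && decide (y < h - x) && (PySem.Int.mod y 2 == PySem.Int.mod x 2)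
  else if part == 1 then decide (x < h) && (decide (h + x ≤ y) && decide (y < n)) && (PySem.Int.mod (y - (h + x)) 2 == 1)
  else if part == 2 then decide (h ≤ x) && decide (y < x - h) && (PySem.Int.mod y 2 == PySem.Int.mod x 2)
  else if part == 3 then decide (h ≤ x) && (decide (n - (x - h) ≤ y) && decide (y < n)) && (PySem.Int.mod (y - (n - (x - h))) 2 == 0)
  else false

lemma regionTest_eq (part n x y : Int) : pvRegionTest part n x y = pvInRegion part n x y := by
  unfold pvRegionTest pvInRegion
  split_ifs <;> rfl


def pvTog (P : Int → Bool) : List Int → Bool → Int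
  | [], _ => 0
  | y :: t, s => (if !s && P y then 1 else 0) + pvTog P t (!s)

lemma foldA (P : Int → Bool) : ∀ (l : List Int) (r : Int) (s : Bool),
    (l.foldl (fun (st : Int × Bool) y =>
        (if !st.2 && P y then st.1 + 1 else st.1, !st.2)) (r, s)).1
      = r + pvTog P l s := by
  intro l
  induction l with
  | nil => intro r s; simp [pvTog]
  | cons y t ih =>
    intro r s
    simp only [List.foldl_cons, pvTog, ih]
    by_cases h : (!s && P y) = true <;> simp [h] <;> ring

lemma pvTog_append (P : Int → Bool) : ∀ (l₁ l₂ : List Int) (s : Bool),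
    pvTog P (l₁ ++ l₂) s
      = pvTog P l₁ s + pvTog P l₂ (xor s (decide (l₁.length % 2 = 1))) := by
  intro l₁
  induction l₁ with
  | nil => intro l₂ s; simp [pvTog]
  | cons y t ih =>
    intro l₂ s
    simp only [List.cons_append, pvTog, ih, List.length_cons]
    have h2 : (t.length + 1) % 2 = 1 ↔ ¬ (t.length % 2 = 1) := by omega
    cases s <;> by_cases ht : t.length % 2 = 1 <;> simp [ht, h2] <;> ring

lemma pvTog_range (P : Int → Bool) (a : Int) : ∀ (m : Nat) (s : Bool),
    pvTog P ((List.range m).map (fun (k : Nat) => a + (k : Int))) s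
      = (((List.range m).countP
            (fun (j : Nat) => decide (j % 2 = (if s then 1 else 0)) && P (a + (j : Int)))) : Int) := by
  intro m
  induction m with
  | zero => intro s; simp [pvTog]
  | succ m ih =>
    intro s
    rw [List.range_succ, List.map_append, pvTog_append, ih, List.countP_append]
    simp only [List.map_cons, List.map_nil, List.length_map, List.length_range, pvTog,
      List.countP_cons, List.countP_nil]
    have hmm : m % 2 = 0 ∨ m % 2 = 1 := Nat.mod_two_eq_zero_or_one m
    cases s <;> rcases hmm with h | h <;>
      by_cases hP : P (a + (m : Int)) = true <;>
      simp [h, hP]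

lemma countP_range_guard (m M : Nat) (h : m ≤ M) (p : Nat → Bool) :
    (List.range M).countP (fun j => decide (j < m) && p j) = (List.range m).countP p := by
  obtain ⟨k, rfl⟩ := Nat.exists_eq_add_of_le h
  rw [List.range_add, List.countP_append]
  have h1 : (List.range m).countP (fun j => decide (j < m) && p j) = (List.range m).countP p := by
    apply List.countP_congr
    intro x hx
    simp [List.mem_range] at hx
    simp [hx]
  have h2 : ((List.range k).map (fun j => m + j)).countP (fun j => decide (j < m) && p j) = 0 := by
    rw [List.countP_eq_zero]
    intro x hx
    simp [List.mem_map] at hx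
    obtain ⟨j, _, rfl⟩ := hx
    simp
  rw [h1, h2]
  omega

lemma countP_range_shift (c m : Nat) (q : Nat → Bool) :
    (List.range m).countP (fun j => q (c + j))
      = (List.range (c + m)).countP (fun y => decide (c ≤ y) && q y) := by
  have h1 : (List.range c).countP (fun y => decide (c ≤ y) && q y) = 0 := by
    rw [List.countP_eq_zero]
    intro x hx
    simp [List.mem_range] at hx
    simp; omega
  have h2 : ((List.range m).map (fun j => c + j)).countP (fun y => decide (c ≤ y) && q y)
      = (List.range m).countP (fun j => q (c + j)) := by
    rw [List.countP_map]
    apply List.countP_congr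
    intro x hx
    simp
  rw [List.range_add, List.countP_append]
  omega

-- the generic per-row count equality
lemma countP_row_eq (c m len : Nat) (par reg pass : Nat → Bool)
    (hreg : ∀ y, reg y = (decide (c ≤ y) && decide (y < c + m) && par (y - c))) :
    (List.range m).countP (fun j => par j && (decide (c + j < len) && pass (c + j)))
      = (List.range len).countP (fun y => reg y && pass y) := by
  have h1 : (List.range m).countP (fun j => par j && (decide (c + j < len) && pass (c + j)))
      = (List.range m).countP
          (fun j => (fun y => decide (y < c + m) && par (y - c) && (decide (y < len) && pass y)) (c + j)) := by
    apply List.countP_congr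
    intro j hj
    simp only [List.mem_range] at hj
    have e1 : decide (c + j < c + m) = true := by simp; omega
    have e2 : c + j - c = j := by omega
    simp [e1, e2]
    try (intros; omega)
  rw [h1, countP_range_shift c m (fun y => decide (y < c + m) && par (y - c) && (decide (y < len) && pass y))]
  set K := max (c + m) len with hK
  have h2 : (List.range (c + m)).countP
        (fun y => decide (c ≤ y) && (decide (y < c + m) && par (y - c) && (decide (y < len) && pass y)))
      = (List.range K).countP
        (fun y => decide (y < c + m) &&
          (decide (c ≤ y) && (decide (y < c + m) && par (y - c) && (decide (y < len) && pass y)))) := by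
    rw [countP_range_guard (c + m) K (by omega)]
  have h3 : (List.range len).countP (fun y => reg y && pass y)
      = (List.range K).countP (fun y => decide (y < len) && (reg y && pass y)) := by
    rw [countP_range_guard len K (by omega)]
  rw [h2, h3]
  apply List.countP_congr
  intro y _
  rw [hreg y]
  by_cases b1 : c ≤ y <;> by_cases b2 : y < c + m <;> by_cases b3 : y < len <;>
    by_cases b4 : par (y - c) = true <;> simp [b1, b2, b3, b4]

lemma cellA_eq (board : List String) (xn : Nat) (hx : xn < board.length) (j : Nat) :
    pvCellA board (xn : Int) (j : Int)
      = (decide (j < (board.getD xn "").toList.length) &&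
         ((board.getD xn "").toList.getD j ' ' == '.' || (board.getD xn "").toList.getD j ' ' == 'S')) := by
  have hb : board[xn]? = some board[xn] := List.getElem?_eq_getElem hx
  have hgd : board.getD xn "" = board[xn] := by simp [List.getD_eq_getElem?_getD, hb]
  simp only [pvCellA, PySem.List.pyGet?_natCast, PySem.Str.pyGet?_natCast, hb, hgd]
  by_cases hj : j < board[xn].toList.length
  · have he : board[xn].toList[j]? = some board[xn].toList[j] := List.getElem?_eq_getElem hj
    simp [he, List.getD_eq_getElem?_getD]
    try (intro _; simpa using hj)
  · have he : board[xn].toList[j]? = none := by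
      rw [List.getElem?_eq_none_iff]; omega
    simp [he, hj]

def pvGB (board : List String) (part : Int) (xn : Nat) : Int :=
  (((List.range (board.getD xn "").toList.length).countP
      (fun (y : Nat) => pvInRegion part (board.length : Int) (xn : Int) (y : Int) &&
        ((board.getD xn "").toList.getD y ' ' == '.' || (board.getD xn "").toList.getD y ' ' == 'S'))) : Int)

lemma B_inner (R : Int → Bool) (cs : List Char) (total : Int) :
    (PySem.List.enumerate cs 0).foldl
        (fun t q => if R q.1 && (q.2 == '.' || q.2 == 'S') then t + 1 else t) total
      = total + (((List.range cs.length).countP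
          (fun (y : Nat) => R (y : Int) && (cs.getD y ' ' == '.' || cs.getD y ' ' == 'S'))) : Int) := by
  rw [PySem.List.enumerate_eq_map_pyRange cs ' ', List.foldl_map]
  rw [PySem.List.foldl_if_add_one]
  congr 1
  rw [PySem.List.len_eq, PySem.List.pyRange_zero_natCast, List.countP_map]
  norm_cast
  apply List.countP_congr
  intro y _
  simp [PySem.List.pyGetD_natCast]

lemma B_red (board : List String) (part : Int) :
    count_rem_alt board part = ((List.range board.length).map (fun xn => pvGB board part xn)).sum := by
  simp only [count_rem_alt, regionTest_eq]
  rw [PySem.List.enumerate_eq_map_pyRange board "", List.foldl_map]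
  simp only [B_inner]
  rw [PySem.List.foldl_add, zero_add, PySem.List.len_eq, PySem.List.pyRange_zero_natCast,
    List.map_map]
  apply congrArg List.sum
  apply List.map_congr_left
  intro xn _
  simp [pvGB, PySem.List.pyGetD_natCast, Function.comp]

lemma A_red_0 (board : List String) :
    count_rem board 0
      = ((PySem.List.pyRange 0 (PySem.Int.floordiv (board.length : Int) 2) 1).map
          (fun x => pvTog (fun y => pvCellA board x y)
            (PySem.List.pyRange 0 (PySem.Int.floordiv (board.length : Int) 2 - x) 1)
            (PySem.Int.mod x 2 != 0))).sum := by
  simp only [count_rem]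
  rw [PySem.Dict.get?_insert_of_ne _ _ (by decide), PySem.Dict.get?_insert_of_ne _ _ (by decide),
    PySem.Dict.get?_insert_of_ne _ _ (by decide), PySem.Dict.get?_insert_self]
  simp only [foldA]
  rw [PySem.List.foldl_add]
  simp

lemma A_red_1 (board : List String) :
    count_rem board 1
      = ((PySem.List.pyRange 0 (PySem.Int.floordiv (board.length : Int) 2) 1).map
          (fun x => pvTog (fun y => pvCellA board x y)
            (PySem.List.pyRange (PySem.Int.floordiv (board.length : Int) 2 + x) (board.length : Int) 1)
            true)).sum := by
  simp only [count_rem]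
  rw [PySem.Dict.get?_insert_of_ne _ _ (by decide), PySem.Dict.get?_insert_of_ne _ _ (by decide),
    PySem.Dict.get?_insert_self]
  simp only [foldA]
  rw [PySem.List.foldl_add]
  simp

lemma A_red_2 (board : List String) :
    count_rem board 2
      = ((PySem.List.pyRange (PySem.Int.floordiv (board.length : Int) 2) (board.length : Int) 1).map
          (fun x => pvTog (fun y => pvCellA board x y)
            (PySem.List.pyRange 0 (x - PySem.Int.floordiv (board.length : Int) 2) 1)
            (PySem.Int.mod x 2 != 0))).sum := by
  simp only [count_rem]
  rw [PySem.Dict.get?_insert_of_ne _ _ (by decide), PySem.Dict.get?_insert_self]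
  simp only [foldA]
  rw [PySem.List.foldl_add]
  simp

lemma A_red_3 (board : List String) :
    count_rem board 3
      = ((PySem.List.pyRange (PySem.Int.floordiv (board.length : Int) 2) (board.length : Int) 1).map
          (fun x => pvTog (fun y => pvCellA board x y)
            (PySem.List.pyRange ((board.length : Int) - (x - PySem.Int.floordiv (board.length : Int) 2)) (board.length : Int) 1)
            false)).sum := by
  simp only [count_rem]
  rw [PySem.Dict.get?_insert_self]
  simp only [foldA]
  rw [PySem.List.foldl_add]
  simp

lemma A_red_none (board : List String) (part : Int)
    (h0 : part ≠ 0) (h1 : part ≠ 1) (h2 : part ≠ 2) (h3 : part ≠ 3) :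
    count_rem board part = 0 := by
  simp only [count_rem]
  rw [PySem.Dict.get?_insert_of_ne _ _ h3, PySem.Dict.get?_insert_of_ne _ _ h2,
    PySem.Dict.get?_insert_of_ne _ _ h1, PySem.Dict.get?_insert_of_ne _ _ h0,
    PySem.Dict.get?_empty]

lemma hfd_cast (n : Nat) : PySem.Int.floordiv (n : Int) 2 = ((n / 2 : Nat) : Int) := by
  exact_mod_cast PySem.Int.floordiv_natCast n 2

lemma hmod_cast (n : Nat) : PySem.Int.mod (n : Int) 2 = ((n % 2 : Nat) : Int) := by
  exact_mod_cast PySem.Int.mod_natCast n 2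

lemma core0 (board : List String) (xn : Nat) (hx : xn < board.length / 2) :
    pvTog (fun y => pvCellA board (xn : Int) y)
        (PySem.List.pyRange 0 (((board.length / 2 : Nat) : Int) - (xn : Int)) 1)
        (PySem.Int.mod (xn : Int) 2 != 0)
      = pvGB board 0 xn := by
  have hxn : xn < board.length := lt_of_lt_of_le hx (Nat.div_le_self _ _)
  set n := board.length with hn
  set cs := (board.getD xn "").toList with hcs
  rw [PySem.List.pyRange_one, pvTog_range, hmod_cast]
  have hm : (((n / 2 : Nat) : Int) - (xn : Int) - 0).toNat = n / 2 - xn := by omega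
  rw [hm]
  have hinit : (if ((((xn % 2 : Nat) : Int)) != 0) then 1 else 0) = xn % 2 := by
    rcases Nat.mod_two_eq_zero_or_one xn with hp | hp <;> simp [hp]
  rw [hinit]
  have hreg : ∀ y : Nat, pvInRegion 0 (n : Int) (xn : Int) (y : Int)
      = (decide (0 ≤ y) && decide (y < 0 + (n / 2 - xn)) && decide ((y - 0) % 2 = xn % 2)) := by
    intro y
    apply Bool.eq_iff_iff.mpr
    simp [pvInRegion, hfd_cast, hmod_cast, beq_iff_eq]
    omega
  have key := countP_row_eq 0 (n / 2 - xn) cs.length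
      (fun j => decide (j % 2 = xn % 2))
      (fun y => pvInRegion 0 (n : Int) (xn : Int) (y : Int))
      (fun y => (cs.getD y ' ' == '.' || cs.getD y ' ' == 'S')) hreg
  have lhs_eq : (List.range (n / 2 - xn)).countP
        (fun (j : Nat) => decide (j % 2 = xn % 2) && pvCellA board (xn : Int) ((0 : Int) + (j : Int)))
      = (List.range (n / 2 - xn)).countP
        (fun j => decide (j % 2 = xn % 2) && (decide (0 + j < cs.length) && (cs.getD (0 + j) ' ' == '.' || cs.getD (0 + j) ' ' == 'S'))) := by
    apply List.countP_congr
    intro j _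
    have hc : ((0 : Int) + (j : Int)) = ((j : Nat) : Int) := by omega
    rw [hc, cellA_eq board xn hxn j]
    simp [hcs, List.getD_eq_getElem?_getD]
  rw [lhs_eq, key]
  rfl

lemma hmod2 (a : Int) : PySem.Int.mod a 2 = a % 2 :=
  PySem.Int.mod_eq_emod_of_pos (by omega)

lemma core2 (board : List String) (xn : Nat) (hlo : board.length / 2 ≤ xn)
    (hxn : xn < board.length) :
    pvTog (fun y => pvCellA board (xn : Int) y)
        (PySem.List.pyRange 0 ((xn : Int) - ((board.length / 2 : Nat) : Int)) 1)
        (PySem.Int.mod (xn : Int) 2 != 0)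
      = pvGB board 2 xn := by
  set n := board.length with hn
  set cs := (board.getD xn "").toList with hcs
  rw [PySem.List.pyRange_one, pvTog_range, hmod_cast]
  have hm : ((xn : Int) - ((n / 2 : Nat) : Int) - 0).toNat = xn - n / 2 := by omega
  rw [hm]
  have hinit : (if ((((xn % 2 : Nat) : Int)) != 0) then 1 else 0) = xn % 2 := by
    rcases Nat.mod_two_eq_zero_or_one xn with hp | hp <;> simp [hp]
  rw [hinit]
  have hreg : ∀ y : Nat, pvInRegion 2 (n : Int) (xn : Int) (y : Int)
      = (decide (0 ≤ y) && decide (y < 0 + (xn - n / 2)) && decide ((y - 0) % 2 = xn % 2)) := by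
    intro y
    apply Bool.eq_iff_iff.mpr
    simp [pvInRegion, hfd_cast, hmod2, beq_iff_eq]
    omega
  have key := countP_row_eq 0 (xn - n / 2) cs.length
      (fun j => decide (j % 2 = xn % 2))
      (fun y => pvInRegion 2 (n : Int) (xn : Int) (y : Int))
      (fun y => (cs.getD y ' ' == '.' || cs.getD y ' ' == 'S')) hreg
  have lhs_eq : (List.range (xn - n / 2)).countP
        (fun (j : Nat) => decide (j % 2 = xn % 2) && pvCellA board (xn : Int) ((0 : Int) + (j : Int)))
      = (List.range (xn - n / 2)).countP
        (fun j => decide (j % 2 = xn % 2) && (decide (0 + j < cs.length) && (cs.getD (0 + j) ' ' == '.' || cs.getD (0 + j) ' ' == 'S'))) := by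
    apply List.countP_congr
    intro j _
    have hc : ((0 : Int) + (j : Int)) = ((j : Nat) : Int) := by omega
    rw [hc, cellA_eq board xn hxn j]
    simp [hcs, List.getD_eq_getElem?_getD]
  rw [lhs_eq, key]
  rfl

lemma core1 (board : List String) (xn : Nat) (hx : xn < board.length / 2) :
    pvTog (fun y => pvCellA board (xn : Int) y)
        (PySem.List.pyRange (((board.length / 2 : Nat) : Int) + (xn : Int)) (board.length : Int) 1)
        true
      = pvGB board 1 xn := by
  have hxn : xn < board.length := lt_of_lt_of_le hx (Nat.div_le_self _ _)
  set n := board.length with hn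
  set cs := (board.getD xn "").toList with hcs
  have ha : ((n / 2 : Nat) : Int) + (xn : Int) = ((n / 2 + xn : Nat) : Int) := by push_cast; ring
  rw [ha, PySem.List.pyRange_one, pvTog_range]
  have hm : ((n : Int) - ((n / 2 + xn : Nat) : Int)).toNat = n - (n / 2 + xn) := by omega
  rw [hm]
  have hreg : ∀ y : Nat, pvInRegion 1 (n : Int) (xn : Int) (y : Int)
      = (decide (n / 2 + xn ≤ y) && decide (y < n / 2 + xn + (n - (n / 2 + xn))) && decide ((y - (n / 2 + xn)) % 2 = 1)) := by
    intro y
    apply Bool.eq_iff_iff.mpr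
    simp [pvInRegion, hfd_cast, hmod2, beq_iff_eq]
    omega
  have key := countP_row_eq (n / 2 + xn) (n - (n / 2 + xn)) cs.length
      (fun j => decide (j % 2 = 1))
      (fun y => pvInRegion 1 (n : Int) (xn : Int) (y : Int))
      (fun y => (cs.getD y ' ' == '.' || cs.getD y ' ' == 'S')) hreg
  have lhs_eq : (List.range (n - (n / 2 + xn))).countP
        (fun (j : Nat) => decide (j % 2 = (if (true : Bool) then 1 else 0)) && pvCellA board (xn : Int) (((n / 2 + xn : Nat) : Int) + (j : Int)))
      = (List.range (n - (n / 2 + xn))).countP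
        (fun j => decide (j % 2 = 1) && (decide (n / 2 + xn + j < cs.length) && (cs.getD (n / 2 + xn + j) ' ' == '.' || cs.getD (n / 2 + xn + j) ' ' == 'S'))) := by
    apply List.countP_congr
    intro j _
    have hc : (((n / 2 + xn : Nat) : Int) + (j : Int)) = (((n / 2 + xn + j : Nat)) : Int) := by push_cast; ring
    rw [hc, cellA_eq board xn hxn (n / 2 + xn + j)]
    simp [hcs, List.getD_eq_getElem?_getD]
  rw [lhs_eq, key]
  rfl

lemma core3 (board : List String) (xn : Nat) (hlo : board.length / 2 ≤ xn)
    (hxn : xn < board.length) :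
    pvTog (fun y => pvCellA board (xn : Int) y)
        (PySem.List.pyRange ((board.length : Int) - ((xn : Int) - ((board.length / 2 : Nat) : Int))) (board.length : Int) 1)
        false
      = pvGB board 3 xn := by
  set n := board.length with hn
  set cs := (board.getD xn "").toList with hcs
  have ha : (n : Int) - ((xn : Int) - ((n / 2 : Nat) : Int)) = ((n - (xn - n / 2) : Nat) : Int) := by omega
  rw [ha, PySem.List.pyRange_one, pvTog_range]
  have hm : ((n : Int) - ((n - (xn - n / 2) : Nat) : Int)).toNat = xn - n / 2 := by omega
  rw [hm]
  have hreg : ∀ y : Nat, pvInRegion 3 (n : Int) (xn : Int) (y : Int)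
      = (decide (n - (xn - n / 2) ≤ y) && decide (y < n - (xn - n / 2) + (xn - n / 2)) && decide ((y - (n - (xn - n / 2))) % 2 = 0)) := by
    intro y
    apply Bool.eq_iff_iff.mpr
    simp [pvInRegion, hfd_cast, hmod2, beq_iff_eq]
    omega
  have key := countP_row_eq (n - (xn - n / 2)) (xn - n / 2) cs.length
      (fun j => decide (j % 2 = 0))
      (fun y => pvInRegion 3 (n : Int) (xn : Int) (y : Int))
      (fun y => (cs.getD y ' ' == '.' || cs.getD y ' ' == 'S')) hreg
  have lhs_eq : (List.range (xn - n / 2)).countP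
        (fun (j : Nat) => decide (j % 2 = (if (false : Bool) then 1 else 0)) && pvCellA board (xn : Int) (((n - (xn - n / 2) : Nat) : Int) + (j : Int)))
      = (List.range (xn - n / 2)).countP
        (fun j => decide (j % 2 = 0) && (decide (n - (xn - n / 2) + j < cs.length) && (cs.getD (n - (xn - n / 2) + j) ' ' == '.' || cs.getD (n - (xn - n / 2) + j) ' ' == 'S'))) := by
    apply List.countP_congr
    intro j _
    have hc : (((n - (xn - n / 2) : Nat) : Int) + (j : Int)) = (((n - (xn - n / 2) + j : Nat)) : Int) := by push_cast; ring
    rw [hc, cellA_eq board xn hxn (n - (xn - n / 2) + j)]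
    simp [hcs, List.getD_eq_getElem?_getD]
  rw [lhs_eq, key]
  rfl

lemma GB01_zero (board : List String) (part : Int) (hp : part = 0 ∨ part = 1) (xn : Nat)
    (h : board.length / 2 ≤ xn) : pvGB board part xn = 0 := by
  simp only [pvGB, Nat.cast_eq_zero]
  rw [List.countP_eq_zero]
  intro y _
  rcases hp with hp | hp <;> subst hp <;>
    simp [pvInRegion, hfd_cast] <;> omega

lemma GB23_zero (board : List String) (part : Int) (hp : part = 2 ∨ part = 3) (xn : Nat)
    (h : xn < board.length / 2) : pvGB board part xn = 0 := by
  simp only [pvGB, Nat.cast_eq_zero]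
  rw [List.countP_eq_zero]
  intro y _
  rcases hp with hp | hp <;> subst hp <;>
    simp [pvInRegion, hfd_cast] <;> omega

lemma GB_other_zero (board : List String) (part : Int)
    (h0 : part ≠ 0) (h1 : part ≠ 1) (h2 : part ≠ 2) (h3 : part ≠ 3) (xn : Nat) :
    pvGB board part xn = 0 := by
  simp only [pvGB, Nat.cast_eq_zero]
  rw [List.countP_eq_zero]
  intro y _
  simp [pvInRegion, h0, h1, h2, h3]

lemma AB_eq (board : List String) (part : Int) :
    count_rem board part = count_rem_alt board part := by
  rw [B_red]
  have hsplit : List.range board.length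
      = List.range (board.length / 2)
        ++ (List.range (board.length - board.length / 2)).map (fun j => board.length / 2 + j) := by
    conv_lhs => rw [show board.length = board.length / 2 + (board.length - board.length / 2) by omega]
    exact List.range_add
  have ht : ((board.length : Int) - ((board.length / 2 : Nat) : Int)).toNat
      = board.length - board.length / 2 := by omega
  by_cases h0 : part = 0
  · subst h0
    rw [A_red_0, hsplit, List.map_append, List.sum_append, List.map_map]
    have hz : ((List.range (board.length - board.length / 2)).map
        ((fun xn => pvGB board 0 xn) ∘ fun j => board.length / 2 + j)).sum = 0 := by
      apply List.sum_eq_zero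
      intro z hz
      simp only [List.mem_map, Function.comp_apply] at hz
      obtain ⟨j, _, rfl⟩ := hz
      exact GB01_zero board 0 (Or.inl rfl) _ (by omega)
    rw [hz, add_zero]
    simp only [hfd_cast]
    rw [PySem.List.pyRange_zero_natCast, List.map_map]
    apply congrArg List.sum
    apply List.map_congr_left
    intro xn hxn
    simp only [List.mem_range] at hxn
    simp only [Function.comp_apply]
    exact core0 board xn hxn
  · by_cases h1 : part = 1
    · subst h1
      rw [A_red_1, hsplit, List.map_append, List.sum_append, List.map_map]
      have hz : ((List.range (board.length - board.length / 2)).map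
          ((fun xn => pvGB board 1 xn) ∘ fun j => board.length / 2 + j)).sum = 0 := by
        apply List.sum_eq_zero
        intro z hz
        simp only [List.mem_map, Function.comp_apply] at hz
        obtain ⟨j, _, rfl⟩ := hz
        exact GB01_zero board 1 (Or.inr rfl) _ (by omega)
      rw [hz, add_zero]
      simp only [hfd_cast]
      rw [PySem.List.pyRange_zero_natCast, List.map_map]
      apply congrArg List.sum
      apply List.map_congr_left
      intro xn hxn
      simp only [List.mem_range] at hxn
      simp only [Function.comp_apply]
      exact core1 board xn hxn
    · by_cases h2 : part = 2
      · subst h2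
        rw [A_red_2, hsplit, List.map_append, List.sum_append, List.map_map]
        have hz : ((List.range (board.length / 2)).map (fun xn => pvGB board 2 xn)).sum = 0 := by
          apply List.sum_eq_zero
          intro z hz
          simp only [List.mem_map] at hz
          obtain ⟨j, hj, rfl⟩ := hz
          simp only [List.mem_range] at hj
          exact GB23_zero board 2 (Or.inl rfl) _ hj
        rw [hz, zero_add]
        simp only [hfd_cast]
        rw [PySem.List.pyRange_one, ht, List.map_map]
        apply congrArg List.sum
        apply List.map_congr_left
        intro k hk
        simp only [List.mem_range] at hk
        simp only [Function.comp_apply]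
        rw [show ((board.length / 2 : Nat) : Int) + (k : Int) = ((board.length / 2 + k : Nat) : Int) by push_cast; ring]
        exact core2 board (board.length / 2 + k) (by omega) (by omega)
      · by_cases h3 : part = 3
        · subst h3
          rw [A_red_3, hsplit, List.map_append, List.sum_append, List.map_map]
          have hz : ((List.range (board.length / 2)).map (fun xn => pvGB board 3 xn)).sum = 0 := by
            apply List.sum_eq_zero
            intro z hz
            simp only [List.mem_map] at hz
            obtain ⟨j, hj, rfl⟩ := hz
            simp only [List.mem_range] at hj
            exact GB23_zero board 3 (Or.inr rfl) _ hj
          rw [hz, zero_add]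
          simp only [hfd_cast]
          rw [PySem.List.pyRange_one, ht, List.map_map]
          apply congrArg List.sum
          apply List.map_congr_left
          intro k hk
          simp only [List.mem_range] at hk
          simp only [Function.comp_apply]
          rw [show ((board.length / 2 : Nat) : Int) + (k : Int) = ((board.length / 2 + k : Nat) : Int) by push_cast; ring]
          exact core3 board (board.length / 2 + k) (by omega) (by omega)
        · rw [A_red_none board part h0 h1 h2 h3]
          symm
          apply List.sum_eq_zero
          intro z hz
          simp only [List.mem_map] at hz
          obtain ⟨j, _, rfl⟩ := hz
          exact GB_other_zero board part h0 h1 h2 h3 j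

-- ===== VERDICT (by name: the statement is the Claim_ definition above) =====
theorem count_rem_spec : Claim_equal_count_rem := by
  intro board part _ _
  show count_rem board part = count_rem_alt board part
  exact AB_eq board part
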